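-- pv_equiv track=rewrite | github.com/njcolvin/2 | hw2.py | get_feature_and_label_dictionaries
-- ===== SOURCE A (Python) =====
-- def get_feature_and_label_dictionaries(common_features, corpus_tags):
--     pos = 0
--     feature_dict = {}
--     for feature in common_features:
--         if not feature in feature_dict.keys():
--             feature_dict[feature] = pos
--             pos += 1
--
--     pos = 0
--     tag_dict = {}
--     for tag_list in corpus_tags:
--         for tag in tag_list:
--             if not tag in tag_dict.keys():
--                 tag_dict[tag] = pos
--                 pos += 1
--
--     return (feature_dict, tag_dict)
-- ===== SOURCE B (Python) =====
-- def get_feature_and_label_dictionaries(common_features, corpus_tags):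
--     # Selection-style peeling: repeatedly take the head of the remaining list as the
--     # next-indexed key, then filter every duplicate of it out of the remainder, so no
--     # membership test against the dict is ever needed.
--     def index_dict(xs):
--         d = {}
--         i = 0
--         while xs:
--             head = xs[0]
--             d[head] = i
--             i += 1
--             xs = [y for y in xs[1:] if y != head]
--         return d
--
--     tags = [t for tl in corpus_tags for t in tl]
--     return (index_dict(common_features), index_dict(tags))
-- ===== Notes on version B (the rewrite author's own statement) =====
-- stated objective: alternative
-- what changed: Replaces A's single pass with a running counter and dict-membership check by a selection-style peel: repeatedly take the head of the remaining (flattened) list as the next key and filter all its duplicates out of the remainder, so the dict never needs a membership test.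
import Mathlib
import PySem

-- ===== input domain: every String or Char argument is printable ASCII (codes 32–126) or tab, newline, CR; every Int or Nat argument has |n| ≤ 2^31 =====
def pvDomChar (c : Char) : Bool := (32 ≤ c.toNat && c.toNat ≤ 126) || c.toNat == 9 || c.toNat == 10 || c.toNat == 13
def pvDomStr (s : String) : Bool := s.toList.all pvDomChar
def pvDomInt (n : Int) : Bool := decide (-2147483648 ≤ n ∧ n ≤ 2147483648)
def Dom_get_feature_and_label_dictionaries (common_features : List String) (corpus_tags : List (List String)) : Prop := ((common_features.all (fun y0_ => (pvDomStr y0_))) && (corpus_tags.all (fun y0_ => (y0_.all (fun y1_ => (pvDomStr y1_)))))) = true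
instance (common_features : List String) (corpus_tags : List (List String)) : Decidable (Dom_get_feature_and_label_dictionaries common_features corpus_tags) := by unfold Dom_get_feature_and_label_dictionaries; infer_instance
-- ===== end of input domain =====

-- B replaces A's single pass with counter+membership-check by a selection-style peel
-- (take the head as next key, filter its duplicates out of the rest); objective: alternative.


-- ===== PORT A =====
-- state (pos, dict); 'if not x in dict.keys(): dict[x] = pos; pos += 1'
def pvStepA (st : Int × PySem.Dict String Int) (x : String) : Int × PySem.Dict String Int :=
  if st.2.contains x then st else (st.1 + 1, st.2.insert x st.1)

def get_feature_and_label_dictionaries (common_features : List String) (corpus_tags : List (List String)) : (List (String × Int)) × (List (String × Int)) :=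
  let fst := common_features.foldl pvStepA (0, PySem.Dict.empty)
  let tst := corpus_tags.foldl (fun st tag_list => tag_list.foldl pvStepA st) (0, PySem.Dict.empty)
  (fst.2.items, tst.2.items)

-- ===== PORT B =====
-- 'while xs: head = xs[0]; d[head] = i; i += 1; xs = [y for y in xs[1:] if y != head]'
def pvPeel (d : PySem.Dict String Int) (i : Int) (xs : List String) : PySem.Dict String Int :=
  match xs with
  | [] => d
  | h :: t => pvPeel (d.insert h i) (i + 1) (t.filter (fun y => y ≠ h))
termination_by xs.length
decreasing_by simpa using Nat.lt_succ_of_le (le_trans (List.length_filter_le _ _) (by simp))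

def get_feature_and_label_dictionaries_alt (common_features : List String) (corpus_tags : List (List String)) : (List (String × Int)) × (List (String × Int)) :=
  ((pvPeel PySem.Dict.empty 0 common_features).items,
   (pvPeel PySem.Dict.empty 0 corpus_tags.flatten).items)

-- ===== PRECONDITION & SPEC =====
def Spec_get_feature_and_label_dictionaries (common_features : List String) (corpus_tags : List (List String)) (out : (List (String × Int)) × (List (String × Int))) : Prop := out = get_feature_and_label_dictionaries_alt common_features corpus_tags
instance (common_features : List String) (corpus_tags : List (List String)) (out : (List (String × Int)) × (List (String × Int))) : Decidable (Spec_get_feature_and_label_dictionaries common_features corpus_tags out) := by unfold Spec_get_feature_and_label_dictionaries; infer_instance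

-- ===== CLAIM =====
def Claim_equal_get_feature_and_label_dictionaries : Prop := ∀ (common_features : List String) (corpus_tags : List (List String)), Dom_get_feature_and_label_dictionaries common_features corpus_tags → Spec_get_feature_and_label_dictionaries common_features corpus_tags (get_feature_and_label_dictionaries common_features corpus_tags)

-- ===== LEMMAS AND PROOFS =====

-- A-side loop invariant: A's (pos, dict) after the seen prefix is (|s|, the enumerate-dict
-- of s), where s is the order-preserving dedup of the prefix.
lemma pvCore (xs : List String) : ∀ (s : List String) (d : PySem.Dict String Int),
    d.items = (PySem.List.enumerate s 0).map (fun p => (p.2, p.1)) →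
    (xs.foldl pvStepA ((s.length : Int), d)).2.items
      = (PySem.List.enumerate (PySem.Set.update s xs) 0).map (fun p => (p.2, p.1)) := by
  induction xs with
  | nil => intro s d hi; simpa [PySem.Set.update] using hi
  | cons x xs ih =>
    intro s d hi
    have hkeys : d.keys = s := by
      rw [PySem.Dict.keys, hi, List.map_map]
      exact PySem.List.map_snd_enumerate s 0
    have hcont : d.contains x = decide (x ∈ s) := by
      rw [PySem.Dict.contains_eq_decide_mem_keys, hkeys]
    have hupd : PySem.Set.update s (x :: xs) = PySem.Set.update (PySem.Set.add s x) xs := by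
      simp [PySem.Set.update]
    by_cases hx : x ∈ s
    · have : pvStepA ((s.length : Int), d) x = ((s.length : Int), d) := by
        simp [pvStepA, hcont, hx]
      rw [List.foldl_cons, this, hupd, PySem.Set.add_of_mem hx]
      exact ih s d hi
    · have hstep : pvStepA ((s.length : Int), d) x
          = (((s ++ [x]).length : Int), d.insert x (s.length : Int)) := by
        simp [pvStepA, hcont, hx]
      have hnc : d.contains x = false := by simp [hcont, hx]
      have hi' : (d.insert x (s.length : Int)).items
          = (PySem.List.enumerate (s ++ [x]) 0).map (fun p => (p.2, p.1)) := by
        rw [PySem.Dict.items_insert_of_not_contains (h := hnc), hi,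
            PySem.List.enumerate_append]
        simp [PySem.List.enumerate]
      rw [List.foldl_cons, hstep, hupd, PySem.Set.add_of_not_mem hx]
      exact ih (s ++ [x]) _ hi'

-- Filtering out an element already in the accumulated set does not change Set.update.
lemma pvUpdateFilter (x : String) (t : List String) : ∀ (s : List String), x ∈ s →
    PySem.Set.update s (t.filter (fun y => y ≠ x)) = PySem.Set.update s t := by
  induction t with
  | nil => intro s _; rfl
  | cons a t ih =>
    intro s hx
    by_cases ha : a = x
    · subst ha
      have hadd : PySem.Set.add s a = s := PySem.Set.add_of_mem hx
      simpa [PySem.Set.update, hadd] using ih s hx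
    · have hmem : x ∈ PySem.Set.add s a := by
        unfold PySem.Set.add; split <;> simp [hx]
      simp only [List.filter_cons]
      have : (decide (a ≠ x)) = true := by simp [ha]
      rw [this]
      simp only [PySem.Set.update, List.foldl_cons]
      exact ih (PySem.Set.add s a) hmem

-- unfolding equations of the well-founded pvPeel
lemma pvPeelNil (d : PySem.Dict String Int) (i : Int) : pvPeel d i [] = d := by
  rw [pvPeel.eq_def]
lemma pvPeelCons (d : PySem.Dict String Int) (i : Int) (h : String) (t : List String) :
    pvPeel d i (h :: t) = pvPeel (d.insert h i) (i + 1) (t.filter (fun y => y ≠ h)) := by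
  rw [pvPeel.eq_def]

-- B-side loop invariant: peeling xs (disjoint from the already-indexed s) yields the
-- enumerate-dict of s ++ dedup-order of xs.
lemma pvPeelCore (xs : List String) : ∀ (s : List String) (d : PySem.Dict String Int),
    d.items = (PySem.List.enumerate s 0).map (fun p => (p.2, p.1)) →
    (∀ y ∈ xs, y ∉ s) →
    (pvPeel d (s.length : Int) xs).items
      = (PySem.List.enumerate (PySem.Set.update s xs) 0).map (fun p => (p.2, p.1)) := by
  induction hn : xs.length using Nat.strong_induction_on generalizing xs with
  | _ n ih =>
    intro s d hi hdisj
    match xs, hn with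
    | [], _ => rw [pvPeelNil]; simpa [PySem.Set.update] using hi
    | h :: t, hn =>
      have hkeys : d.keys = s := by
        rw [PySem.Dict.keys, hi, List.map_map]
        exact PySem.List.map_snd_enumerate s 0
      have hhs : h ∉ s := hdisj h (by simp)
      have hnc : d.contains h = false := by
        rw [PySem.Dict.contains_eq_decide_mem_keys, hkeys]; simp [hhs]
      have hi' : (d.insert h (s.length : Int)).items
          = (PySem.List.enumerate (s ++ [h]) 0).map (fun p => (p.2, p.1)) := by
        rw [PySem.Dict.items_insert_of_not_contains (h := hnc), hi,
            PySem.List.enumerate_append]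
        simp [PySem.List.enumerate]
      have hdisj' : ∀ y ∈ t.filter (fun y => y ≠ h), y ∉ s ++ [h] := by
        intro y hy
        have hyt := List.mem_of_mem_filter hy
        have hyh : y ≠ h := by simpa using List.of_mem_filter hy
        simp [hdisj y (by simp [hyt]), hyh]
      have hlen : (t.filter (fun y => y ≠ h)).length < n := by
        subst hn; simpa using Nat.lt_succ_of_le (List.length_filter_le _ _)
      have hrec := ih _ hlen (t.filter (fun y => y ≠ h)) rfl (s ++ [h])
        (d.insert h (s.length : Int)) hi' hdisj'
      have hupd : PySem.Set.update (s ++ [h]) (t.filter (fun y => y ≠ h))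
          = PySem.Set.update s (h :: t) := by
        rw [pvUpdateFilter h t (s ++ [h]) (by simp)]
        have : PySem.Set.add s h = s ++ [h] := PySem.Set.add_of_not_mem hhs
        simp [PySem.Set.update, this]
      rw [pvPeelCons]
      rw [hupd] at hrec
      simpa using hrec

-- ===== VERDICT =====
theorem get_feature_and_label_dictionaries_spec : Claim_equal_get_feature_and_label_dictionaries := by
  intro cf ct _
  show _ = _
  unfold get_feature_and_label_dictionaries get_feature_and_label_dictionaries_alt
  rw [← List.foldl_flatten]
  have hA := fun xs => pvCore xs [] PySem.Dict.empty (by simp [PySem.List.enumerate, PySem.Dict.empty])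
  have hB := fun xs => pvPeelCore xs [] PySem.Dict.empty (by simp [PySem.List.enumerate, PySem.Dict.empty]) (by simp)
  simp only [List.length_nil, Int.natCast_zero] at hA hB
  exact Prod.ext ((hA cf).trans (hB cf).symm) ((hA ct.flatten).trans (hB ct.flatten).symm)
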